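-- pv_equiv track=rewrite | github.com/BerriAI/litellm | env/lib/python3.9/site-packages/mangum/handlers/alb.py | case_mutated_headers
-- ===== SOURCE A (Python) =====
-- from itertools import islice
-- from typing import Dict, Generator, List, Tuple
--
-- def all_casings(input_string: str) -> Generator[str, None, None]:
--     """
--     Permute all casings of a given string.
--     A pretty algoritm, via @Amber
--     http://stackoverflow.com/questions/6792803/finding-all-possible-case-permutations-in-python
--     """
--     if not input_string:
--         yield ""
--     else:
--         first = input_string[:1]
--         if first.lower() == first.upper():
--             for sub_casing in all_casings(input_string[1:]):
--                 yield first + sub_casing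
--         else:
--             for sub_casing in all_casings(input_string[1:]):
--                 yield first.lower() + sub_casing
--                 yield first.upper() + sub_casing
--
-- def case_mutated_headers(multi_value_headers: Dict[str, List[str]]) -> Dict[str, str]:
--     """Create str/str key/value headers, with duplicate keys case mutated."""
--     headers: Dict[str, str] = {}
--     for key, values in multi_value_headers.items():
--         if len(values) > 0:
--             casings = list(islice(all_casings(key), len(values)))
--             for value, cased_key in zip(values, casings):
--                 headers[cased_key] = value
--     return headers
-- ===== SOURCE B (Python) =====
-- def nth_casing(key, n):
--     # n-th casing of key in binary-counting order: j-th cased char is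
--     # upper-cased iff bit j of n is set (first cased char = bit 0).
--     out = []
--     for c in key:
--         if c.lower() == c.upper():
--             out.append(c)
--         else:
--             out.append(c.upper() if n & 1 else c.lower())
--             n >>= 1
--     return "".join(out)
--
--
-- def case_mutated_headers(multi_value_headers):
--     """Create str/str key/value headers, with duplicate keys case mutated."""
--     headers = {}
--     for key, values in multi_value_headers.items():
--         m = sum(1 for c in key if c.lower() != c.upper())
--         for n in range(min(len(values), 1 << m)):
--             headers[nth_casing(key, n)] = values[n]
--     return headers
-- ===== Notes on version B (the rewrite author's own statement) =====
-- stated objective: simpler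
-- what changed: Replaces the recursive all_casings generator plus islice/zip with a direct bit-indexed computation: the n-th casing is built in one pass over the key, upper-casing the j-th cased character exactly when bit j of n is set, for n up to min(len(values), 2**m).
import Mathlib
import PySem

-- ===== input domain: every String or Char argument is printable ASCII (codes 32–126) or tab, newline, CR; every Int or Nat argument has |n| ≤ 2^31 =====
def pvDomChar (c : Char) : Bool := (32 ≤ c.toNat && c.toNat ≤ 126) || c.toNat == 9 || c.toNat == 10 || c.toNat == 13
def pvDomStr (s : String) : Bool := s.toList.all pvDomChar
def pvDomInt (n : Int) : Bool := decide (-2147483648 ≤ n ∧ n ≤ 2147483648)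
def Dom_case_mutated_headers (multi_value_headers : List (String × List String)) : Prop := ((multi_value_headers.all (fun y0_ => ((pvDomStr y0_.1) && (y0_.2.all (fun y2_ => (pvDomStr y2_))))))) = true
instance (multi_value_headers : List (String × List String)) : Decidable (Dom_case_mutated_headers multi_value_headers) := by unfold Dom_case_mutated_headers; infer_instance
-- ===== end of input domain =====

-- B replaces the recursive all-casings generator by a direct bit-indexed
-- computation of the n-th casing (simpler: no generator/islice/zip machinery).

-- ===== PORT A =====
-- all_casings: recursive generator, materialised as the list of yielded strings (as List Char)
def pvAllCasings : List Char → List (List Char)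
  | [] => [[]]
  | c :: rest =>
    if PySem.Chars.lowerChar c == PySem.Chars.upperChar c then
      (pvAllCasings rest).map (fun s => c :: s)
    else
      (pvAllCasings rest).flatMap
        (fun s => [PySem.Chars.lowerChar c :: s, PySem.Chars.upperChar c :: s])

def case_mutated_headers (multi_value_headers : List (String × List String)) : List (String × String) :=
  (multi_value_headers.foldl
    (fun (headers : PySem.Dict String String) kv =>
      let key := kv.1
      let values := kv.2
      if values.length > 0 then
        -- list(islice(all_casings(key), len(values)))
        let casings := ((pvAllCasings key.toList).take values.length).map String.ofList
        (values.zip casings).foldl (fun h p => h.insert p.2 p.1) headers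
      else headers)
    PySem.Dict.empty).items

-- ===== PORT B =====
-- nth_casing: loop over the key's chars carrying the remaining bits of n
def pvNthCasing : List Char → Nat → List Char
  | [], _ => []
  | c :: rest, n =>
    if PySem.Chars.lowerChar c == PySem.Chars.upperChar c then
      c :: pvNthCasing rest n
    else
      (if n &&& 1 == 1 then PySem.Chars.upperChar c else PySem.Chars.lowerChar c)
        :: pvNthCasing rest (n >>> 1)

-- m = sum(1 for c in key if c.lower() != c.upper())  (a 0/1-sum is countP)
def pvCasedCount (cs : List Char) : Nat :=
  cs.countP (fun c => !(PySem.Chars.lowerChar c == PySem.Chars.upperChar c))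

def case_mutated_headers_alt (multi_value_headers : List (String × List String)) : List (String × String) :=
  (multi_value_headers.foldl
    (fun (headers : PySem.Dict String String) kv =>
      let key := kv.1
      let values := kv.2
      let m := pvCasedCount key.toList
      (List.range (min values.length (2 ^ m))).foldl
        (fun h n => h.insert (String.ofList (pvNthCasing key.toList n)) (values.getD n ""))
        headers)
    PySem.Dict.empty).items

-- ===== PRECONDITION & SPEC =====
def Spec_case_mutated_headers (multi_value_headers : List (String × List String)) (out : List (String × String)) : Prop := out = case_mutated_headers_alt multi_value_headers
instance (multi_value_headers : List (String × List String)) (out : List (String × String)) : Decidable (Spec_case_mutated_headers multi_value_headers out) := by unfold Spec_case_mutated_headers; infer_instance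

-- ===== CLAIM (what is proved, stated in full; the proofs are below) =====
def Claim_equal_case_mutated_headers : Prop := ∀ (multi_value_headers : List (String × List String)), Dom_case_mutated_headers multi_value_headers → Spec_case_mutated_headers multi_value_headers (case_mutated_headers multi_value_headers)

-- ===== LEMMAS AND PROOFS =====

-- a range of even length, mapped, is the flatMap of even/odd pairs
theorem pv_range_two_mul {α : Type} (f : Nat → α) :
    ∀ k, (List.range (2 * k)).map f
      = (List.range k).flatMap (fun i => [f (2 * i), f (2 * i + 1)]) := by
  intro k
  induction k with
  | zero => simp
  | succ k ih =>
    have h2 : 2 * (k + 1) = (2 * k + 1) + 1 := by omega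
    rw [h2, List.range_succ, List.range_succ, List.range_succ]
    simp [ih]

theorem pvNthCasing_even (c : Char) (rest : List Char)
    (h : (PySem.Chars.lowerChar c == PySem.Chars.upperChar c) = false) (i : Nat) :
    pvNthCasing (c :: rest) (2 * i) = PySem.Chars.lowerChar c :: pvNthCasing rest i := by
  have h1 : (2 * i) &&& 1 = 0 := by
    rw [Nat.and_one_is_mod]; omega
  have h2 : (2 * i) >>> 1 = i := by
    rw [Nat.shiftRight_one]; omega
  simp [pvNthCasing, h, h1, h2]

theorem pvNthCasing_odd (c : Char) (rest : List Char)
    (h : (PySem.Chars.lowerChar c == PySem.Chars.upperChar c) = false) (i : Nat) :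
    pvNthCasing (c :: rest) (2 * i + 1) = PySem.Chars.upperChar c :: pvNthCasing rest i := by
  have h1 : (2 * i + 1) &&& 1 = 1 := by
    rw [Nat.and_one_is_mod]; omega
  have h2 : (2 * i + 1) >>> 1 = i := by
    rw [Nat.shiftRight_one]; omega
  simp [pvNthCasing, h, h1, h2]

-- A's list of all casings is the bit-indexed enumeration, in the same order
theorem pvAllCasings_eq (cs : List Char) :
    pvAllCasings cs = (List.range (2 ^ pvCasedCount cs)).map (pvNthCasing cs) := by
  induction cs with
  | nil => simp [pvAllCasings, pvCasedCount, pvNthCasing]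
  | cons c rest ih =>
    by_cases h : (PySem.Chars.lowerChar c == PySem.Chars.upperChar c) = true
    · have hm : pvCasedCount (c :: rest) = pvCasedCount rest := by
        simp [pvCasedCount, h]
      rw [show pvAllCasings (c :: rest)
            = (pvAllCasings rest).map (fun s => c :: s) by simp [pvAllCasings, h],
          ih, hm, List.map_map]
      apply List.map_congr_left
      intro n _
      simp [pvNthCasing, h]
    · have h' : (PySem.Chars.lowerChar c == PySem.Chars.upperChar c) = false := by
        simpa using h
      have hm : pvCasedCount (c :: rest) = pvCasedCount rest + 1 := by
        simp [pvCasedCount, h']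
      rw [show pvAllCasings (c :: rest)
            = (pvAllCasings rest).flatMap
                (fun s => [PySem.Chars.lowerChar c :: s, PySem.Chars.upperChar c :: s]) by
            simp [pvAllCasings, h'],
          ih, hm, pow_succ, mul_comm (2 ^ pvCasedCount rest) 2,
          pv_range_two_mul, List.flatMap_map]
      exact List.flatMap_congr (fun i _ => by
        rw [pvNthCasing_even c rest h' i, pvNthCasing_odd c rest h' i])

-- zip of a list with a mapped range, written as a single map over the range
theorem pv_zip_map_range {α β : Type} (vs : List α) (g : Nat → β) (c : Nat)
    (hc : c ≤ vs.length) (d : α) :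
    vs.zip ((List.range c).map g)
      = (List.range c).map (fun n => (vs.getD n d, g n)) := by
  apply List.ext_getElem
  · simp [List.length_zip]; omega
  · intro i h1 h2
    have hi : i < c := by simpa using h2
    have hiv : i < vs.length := lt_of_lt_of_le hi hc
    simp [List.getElem_zip, List.getD_eq_getElem?_getD, List.getElem?_eq_getElem hiv]

-- the two inner per-header loops produce the same dict
theorem pv_inner_eq (key : String) (values : List String) (headers : PySem.Dict String String) :
    (if values.length > 0 then
      (values.zip (((pvAllCasings key.toList).take values.length).map String.ofList)).foldl
        (fun h p => h.insert p.2 p.1) headers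
     else headers)
    = (List.range (min values.length (2 ^ pvCasedCount key.toList))).foldl
        (fun h n => h.insert (String.ofList (pvNthCasing key.toList n)) (values.getD n ""))
        headers := by
  by_cases hv : values.length > 0
  · rw [if_pos hv, pvAllCasings_eq, ← List.map_take, List.take_range, List.map_map,
        pv_zip_map_range values _ _ (by omega) "", List.foldl_map]
    rfl
  · have h0 : values.length = 0 := by omega
    simp [h0]

-- ===== VERDICT (by name: the statement is the Claim_ definition above) =====
theorem case_mutated_headers_spec : Claim_equal_case_mutated_headers := by
  intro mvh _
  unfold Spec_case_mutated_headers case_mutated_headers case_mutated_headers_alt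
  have hfun : (fun (headers : PySem.Dict String String) (kv : String × List String) =>
      let key := kv.1
      let values := kv.2
      if values.length > 0 then
        let casings := ((pvAllCasings key.toList).take values.length).map String.ofList
        (values.zip casings).foldl (fun h p => h.insert p.2 p.1) headers
      else headers)
      = (fun (headers : PySem.Dict String String) (kv : String × List String) =>
      let key := kv.1
      let values := kv.2
      let m := pvCasedCount key.toList
      (List.range (min values.length (2 ^ m))).foldl
        (fun h n => h.insert (String.ofList (pvNthCasing key.toList n)) (values.getD n ""))
        headers) := by
    funext h kv
    exact pv_inner_eq kv.1 kv.2 h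
  rw [hfun]
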